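-- pv_equiv track=rewrite | github.com/Bae-hong-seob/2021-2-University_2_2 | 자료구조/2차과제/String_remove_duplication_stack.py | remove_duplicate_letters_stack
-- ===== SOURCE A (Python) =====
-- from collections import Counter
--
-- def remove_duplicate_letters_stack(s: str) -> str:
--     counter, stack = Counter(s), []
--     seen = set()
--
--     for char in s:
--         counter[char] -= 1
--         if char in seen:
--             continue
--
--         while stack and char < stack[-1] and counter[stack[-1]] > 0:
--             seen.remove(stack.pop())
--
--         stack.append(char)
--         seen.add(char)
--
--     return "".join(stack)
-- ===== SOURCE B (Python) =====
-- def remove_duplicate_letters_stack(s: str) -> str: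
--     # Recursive greedy selection: pick the smallest character whose prefix
--     # window still allows every later distinct character, then recurse.
--     if not s:
--         return ''
--     ch, pos = s[0], 0
--     for i, c in enumerate(s):
--         if c < ch:
--             ch, pos = c, i
--         if c not in s[i + 1:]:
--             break
--     return ch + remove_duplicate_letters_stack(s[pos + 1:].replace(ch, ''))
-- ===== Notes on version B (the rewrite author's own statement) =====
-- stated objective: alternative
-- what changed: Replaced the Counter+seen+stack single pass by a recursive greedy selection: scan to the first character with no later occurrence, emit the smallest character seen up to that point, and recurse on the suffix after it with that character removed.
import Mathlib
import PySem

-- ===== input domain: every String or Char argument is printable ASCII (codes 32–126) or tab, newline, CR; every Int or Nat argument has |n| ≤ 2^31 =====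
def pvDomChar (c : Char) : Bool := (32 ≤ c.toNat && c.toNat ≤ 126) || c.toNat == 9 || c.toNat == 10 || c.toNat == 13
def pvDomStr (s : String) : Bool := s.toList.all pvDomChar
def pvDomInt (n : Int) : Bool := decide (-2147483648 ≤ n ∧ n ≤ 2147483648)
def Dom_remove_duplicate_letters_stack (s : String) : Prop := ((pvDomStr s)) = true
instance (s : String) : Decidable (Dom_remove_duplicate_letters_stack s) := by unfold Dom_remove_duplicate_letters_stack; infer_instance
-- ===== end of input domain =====

-- B replaces A's Counter+seen+stack single pass by a recursive greedy selection
-- (scan to the first character with no later occurrence, emit the smallest seen,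
-- recurse on the cleaned suffix); objective: alternative algorithm, same result.

-- ===== PORT A =====
-- Python's stack (append/pop at the right end) is encoded top-at-head, so
-- ''.join(stack) reverses at the end.  seen.remove(x) is Set.discard: the popped
-- element is always in seen, so remove never raises and equals discard.
def pyPop (c : Char) (counter : PySem.Dict Char Int) :
    List Char → PySem.Set Char → List Char × PySem.Set Char
  | [], seen => ([], seen)
  | t :: st, seen =>
      if c < t ∧ counter.getD t 0 > 0 then pyPop c counter st (PySem.Set.discard seen t)
      else (t :: st, seen)

def pyLoop (counter : PySem.Dict Char Int) (stack : List Char) (seen : PySem.Set Char) :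
    List Char → List Char
  | [] => stack
  | c :: rest =>
      let counter' := counter.modify c 0 (· - 1)
      if PySem.Set.contains seen c then pyLoop counter' stack seen rest
      else
        let ps := pyPop c counter' stack seen
        pyLoop counter' (c :: ps.1) (PySem.Set.add ps.2 c) rest

def remove_duplicate_letters_stack (s : String) : String :=
  String.mk ((pyLoop (PySem.Dict.counter s.toList) [] PySem.Set.empty s.toList).reverse)

-- ===== PORT B =====
-- the scan 'for i, c in enumerate(s): if c < ch: ch, pos = c, i; if c not in s[i+1:]: break'
def scanB (ch : Char) (pos : Nat) (i : Nat) : List Char → Char × Nat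
  | [] => (ch, pos)
  | c :: rest =>
      let cp := if c < ch then (c, i) else (ch, pos)
      if c ∈ rest then scanB cp.1 cp.2 (i + 1) rest else cp

-- ch + rec(s[pos+1:].replace(ch, ''))
def altCore (l : List Char) : List Char :=
  match l with
  | [] => []
  | c0 :: t =>
      let cp := scanB c0 0 0 (c0 :: t)
      cp.1 :: altCore (((c0 :: t).drop (cp.2 + 1)).filter (· ≠ cp.1))
termination_by l.length
decreasing_by
  have h1 := List.length_filter_le (fun x => decide (x ≠ cp.1)) ((c0 :: t).drop (cp.2 + 1))
  have h2 : ((c0 :: t).drop (cp.2 + 1)).length ≤ t.length := by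
    rw [List.length_drop]; simp
  exact lt_of_le_of_lt (le_trans h1 h2) (by simp)

def remove_duplicate_letters_stack_alt (s : String) : String :=
  String.mk (altCore s.toList)

-- ===== PRECONDITION & SPEC =====
def Spec_remove_duplicate_letters_stack (s : String) (out : String) : Prop := out = remove_duplicate_letters_stack_alt s
instance (s : String) (out : String) : Decidable (Spec_remove_duplicate_letters_stack s out) := by unfold Spec_remove_duplicate_letters_stack; infer_instance

-- ===== CLAIM (what is proved, stated in full; the proofs are below) =====
def Claim_equal_remove_duplicate_letters_stack : Prop := ∀ (s : String), Dom_remove_duplicate_letters_stack s → Spec_remove_duplicate_letters_stack s (remove_duplicate_letters_stack s)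

-- ===== LEMMAS AND PROOFS =====

-- Clean model of A's pass: the counter holds the multiset of the not-yet-scanned
-- suffix, so `counter[t] > 0` is `t ∈ rest`, and seen is stack membership.
def popW (c : Char) (rest : List Char) : List Char → List Char
  | [] => []
  | t :: st => if c < t ∧ t ∈ rest then popW c rest st else t :: st

def runA (stack : List Char) : List Char → List Char
  | [] => stack
  | c :: rest => if c ∈ stack then runA stack rest else runA (c :: popW c rest stack) rest

-- protection invariant: while the emitted letter ch still occurs ahead, either a
-- blocker (a stack letter with no further occurrence) protects the bottom, or the
-- blocker is still ahead and no letter smaller than ch comes before it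
def INV (ch : Char) (stack w : List Char) : Prop :=
  ch ∈ w →
    (∃ x ∈ stack, x ∉ w) ∨
    ∃ a x b, w = a ++ x :: b ∧ (∀ c ∈ a, ¬ c < ch) ∧ ¬ x < ch ∧ x ∉ b

lemma popW_suffix (c : Char) (rest : List Char) : ∀ st, (popW c rest st).IsSuffix st := by
  intro st
  induction st with
  | nil => simp [popW]
  | cons t st ih =>
      simp only [popW]
      split
      · exact ih.trans (List.suffix_cons t st)
      · exact List.suffix_refl _

lemma mem_of_mem_popW {c : Char} {rest st : List Char} {x : Char}
    (h : x ∈ popW c rest st) : x ∈ st := (popW_suffix c rest st).subset h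

lemma popW_append {c : Char} {rest : List Char} :
    ∀ {st} (ys : List Char), popW c rest st ≠ [] → popW c rest (st ++ ys) = popW c rest st ++ ys := by
  intro st
  induction st with
  | nil => intro ys h; exact absurd rfl h
  | cons t st ih =>
      intro ys h
      simp only [popW, List.cons_append] at h ⊢
      by_cases hcond : c < t ∧ t ∈ rest
      · simp only [if_pos hcond] at h ⊢
        exact ih ys h
      · simp only [if_neg hcond]
        rfl

lemma popW_nil_forall {c : Char} {rest : List Char} :
    ∀ {st}, popW c rest st = [] → ∀ t ∈ st, c < t ∧ t ∈ rest := by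
  intro st
  induction st with
  | nil => simp
  | cons t st ih =>
      intro h u hu
      simp only [popW] at h
      split at h <;> rename_i hcond
      · rcases List.mem_cons.1 hu with rfl | hu'
        · exact hcond
        · exact ih h u hu'
      · simp at h

lemma popW_forall_nil {c : Char} {rest : List Char} :
    ∀ {st}, (∀ t ∈ st, c < t ∧ t ∈ rest) → popW c rest st = [] := by
  intro st
  induction st with
  | nil => simp [popW]
  | cons t st ih =>
      intro h
      simp only [popW]
      rw [if_pos (h t (List.mem_cons_self))]
      exact ih fun u hu => h u (List.mem_cons_of_mem _ hu)

lemma popW_skip_all {c : Char} {rest : List Char} :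
    ∀ {st} (ys : List Char), (∀ t ∈ st, c < t ∧ t ∈ rest) →
      popW c rest (st ++ ys) = popW c rest ys := by
  intro st
  induction st with
  | nil => simp
  | cons t st ih =>
      intro ys h
      simp only [List.cons_append, popW]
      rw [if_pos (h t (List.mem_cons_self))]
      exact ih ys fun u hu => h u (List.mem_cons_of_mem _ hu)

lemma mem_popW_of_not_mem {c : Char} {rest : List Char} :
    ∀ {st} {x : Char}, x ∈ st → x ∉ rest → x ∈ popW c rest st := by
  intro st
  induction st with
  | nil => simp
  | cons t st ih =>
      intro x hx hnx
      simp only [popW]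
      split <;> rename_i hcond
      · rcases List.mem_cons.1 hx with rfl | hx'
        · exact absurd hcond.2 hnx
        · exact ih hx' hnx
      · exact hx

lemma popW_filter_ne {c ch : Char} {rest : List Char} :
    ∀ {st}, ch ∉ st → popW c (rest.filter (· ≠ ch)) st = popW c rest st := by
  intro st
  induction st with
  | nil => simp [popW]
  | cons t st ih =>
      intro hch
      have ht : t ≠ ch := fun h => hch (h ▸ List.mem_cons_self)
      have hiff : (t ∈ rest.filter (· ≠ ch)) ↔ t ∈ rest := by
        simp [List.mem_filter, ht]
      simp only [popW]
      by_cases hcond : c < t ∧ t ∈ rest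
      · rw [if_pos ⟨hcond.1, hiff.2 hcond.2⟩, if_pos hcond,
          ih (fun h => hch (List.mem_cons_of_mem _ h))]
      · rw [if_neg (fun h => hcond ⟨h.1, hiff.1 h.2⟩), if_neg hcond]

lemma INV_skip {ch c : Char} {stack rest : List Char}
    (hinv : INV ch stack (c :: rest)) (h : c ∈ stack ∨ c = ch) : INV ch stack rest := by
  intro hch
  rcases hinv (List.mem_cons_of_mem _ hch) with ⟨x, hx, hnx⟩ | ⟨a, x, b, heq, ha, hxlt, hb⟩
  · exact Or.inl ⟨x, hx, fun h' => hnx (List.mem_cons_of_mem _ h')⟩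
  · cases a with
    | nil =>
        simp only [List.nil_append, List.cons.injEq] at heq
        obtain ⟨rfl, rfl⟩ := heq
        rcases h with h | rfl
        · exact Or.inl ⟨c, h, hb⟩
        · exact absurd hch hb
    | cons a0 a' =>
        simp only [List.cons_append, List.cons.injEq] at heq
        obtain ⟨rfl, heq'⟩ := heq
        exact Or.inr ⟨a', x, b, heq', fun e he => ha e (List.mem_cons_of_mem _ he), hxlt, hb⟩

lemma INV_push {ch c : Char} {stack rest : List Char}
    (hinv : INV ch stack (c :: rest)) : INV ch (c :: popW c rest stack) rest := by
  intro hch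
  rcases hinv (List.mem_cons_of_mem _ hch) with ⟨x, hx, hnx⟩ | ⟨a, x, b, heq, ha, hxlt, hb⟩
  · have hxr : x ∉ rest := fun h' => hnx (List.mem_cons_of_mem _ h')
    exact Or.inl ⟨x, List.mem_cons_of_mem _ (mem_popW_of_not_mem hx hxr), hxr⟩
  · cases a with
    | nil =>
        simp only [List.nil_append, List.cons.injEq] at heq
        obtain ⟨rfl, rfl⟩ := heq
        exact Or.inl ⟨c, List.mem_cons_self, hb⟩
    | cons a0 a' =>
        simp only [List.cons_append, List.cons.injEq] at heq
        obtain ⟨rfl, heq'⟩ := heq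
        exact Or.inr ⟨a', x, b, heq', fun e he => ha e (List.mem_cons_of_mem _ he), hxlt, hb⟩

lemma INV_no_pop {ch c : Char} {stack rest : List Char}
    (hinv : INV ch stack (c :: rest)) (hpop : popW c rest stack = []) :
    ¬(c < ch ∧ ch ∈ rest) := by
  rintro ⟨h1, h2⟩
  rcases hinv (List.mem_cons_of_mem _ h2) with ⟨x, hx, hnx⟩ | ⟨a, x, b, heq, ha, hxlt, hb⟩
  · exact hnx (List.mem_cons_of_mem _ (popW_nil_forall hpop x hx).2)
  · cases a with
    | nil =>
        simp only [List.nil_append, List.cons.injEq] at heq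
        obtain ⟨rfl, rfl⟩ := heq
        exact hxlt h1
    | cons a0 a' =>
        simp only [List.cons_append, List.cons.injEq] at heq
        exact ha a0 (List.mem_cons_self) (heq.1 ▸ h1)

-- Phase 1 of one round: scanning the strictly-greater prefix leaves exactly [ch].
lemma runA_toMin (ch : Char) (v : List Char) :
    ∀ (u stack : List Char), (∀ c ∈ u, ch < c ∧ c ∈ v) → (∀ t ∈ stack, ch < t ∧ t ∈ v) →
      runA stack (u ++ ch :: v) = runA [ch] v := by
  intro u
  induction u with
  | nil =>
      intro stack _ hstack
      simp only [List.nil_append, runA]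
      have hmem : ch ∉ stack := fun h => lt_irrefl ch (hstack ch h).1
      rw [if_neg hmem, popW_forall_nil hstack]
  | cons c u' ih =>
      intro stack hu hstack
      simp only [List.cons_append, runA]
      by_cases hc : c ∈ stack
      · rw [if_pos hc]; exact ih stack (fun e he => hu e (List.mem_cons_of_mem _ he)) hstack
      · rw [if_neg hc]
        refine ih _ (fun e he => hu e (List.mem_cons_of_mem _ he)) ?_
        intro t ht
        rcases List.mem_cons.1 ht with rfl | ht'
        · exact hu t (List.mem_cons_self)
        · exact hstack t (mem_of_mem_popW ht')

-- Phase 2: with ch at the protected bottom, the rest of the pass is the pass on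
-- the suffix with ch removed.
lemma runA_bottom (ch : Char) :
    ∀ (w stack : List Char), ch ∉ stack → INV ch stack w →
      runA (stack ++ [ch]) w = runA stack (w.filter (· ≠ ch)) ++ [ch] := by
  intro w
  induction w with
  | nil => intro stack _ _; simp [runA]
  | cons c rest ih =>
      intro stack hch hinv
      by_cases hc : c = ch
      · subst hc
        rw [show (c :: rest).filter (· ≠ c) = rest.filter (· ≠ c) by simp]
        simp only [runA]
        rw [if_pos (List.mem_append.2 (Or.inr (List.mem_cons_self)))]
        exact ih stack hch (INV_skip hinv (Or.inr rfl))
      · rw [show (c :: rest).filter (· ≠ ch) = c :: rest.filter (· ≠ ch) by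
          simp [hc]]
        by_cases hcs : c ∈ stack
        · simp only [runA]
          rw [if_pos (List.mem_append.2 (Or.inl hcs)), if_pos hcs]
          exact ih stack hch (INV_skip hinv (Or.inl hcs))
        · have hcs' : c ∉ stack ++ [ch] := by simp [hcs, hc]
          simp only [runA]
          rw [if_neg hcs', if_neg hcs, popW_filter_ne hch]
          by_cases hP : popW c rest stack = []
          · rw [popW_skip_all [ch] (popW_nil_forall hP)]
            have hnp := INV_no_pop hinv hP
            have hpop1 : popW c rest [ch] = [ch] := by
              simp only [popW]
              rw [if_neg (fun h => hnp ⟨h.1, h.2⟩)]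
            rw [hpop1, hP]
            have hinv' := INV_push (c := c) hinv
            rw [hP] at hinv'
            have := ih [c] (by simp [Ne.symm hc]) hinv'
            simpa using this
          · rw [popW_append [ch] hP]
            rw [show c :: (popW c rest stack ++ [ch]) = (c :: popW c rest stack) ++ [ch] from rfl]
            refine ih (c :: popW c rest stack) ?_ (INV_push hinv)
            intro h
            rcases List.mem_cons.1 h with rfl | h'
            · exact hc rfl
            · exact hch (mem_of_mem_popW h')

-- every letter of a prefix in which each position's letter occurs again later
-- also occurs in the continuation w'
lemma reoccur (p : List Char) :
    ∀ (w' : List Char), (∀ i (h : i < p.length), p[i] ∈ p.drop (i + 1) ++ w') →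
      ∀ e ∈ p, e ∈ w' := by
  induction p using List.reverseRecOn with
  | nil => simp
  | append_singleton p' d ih =>
      intro w' h e he
      have hd : d ∈ w' := by
        have := h p'.length (by simp)
        simpa using this
      rcases List.mem_append.1 he with he' | he''
      · have step : ∀ i (hi : i < p'.length), p'[i] ∈ p'.drop (i + 1) ++ (d :: w') := by
          intro i hi
          have hi' : i < (p' ++ [d]).length := by simp; omega
          have hh := h i hi'
          rw [List.getElem_append_left hi] at hh
          rw [List.drop_append_of_le_length (by omega)] at hh
          simpa [List.append_assoc] using hh
        have := ih (d :: w') step e he'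
        rcases List.mem_cons.1 this with rfl | h2
        · exact hd
        · exact h2
      · have : e = d := by simpa using he''
        exact this ▸ hd

-- full characterisation of B's scan: it returns the first minimum ch of the
-- shortest prefix ending at a letter with no later occurrence; everything before
-- ch is greater and reoccurs after it, and the suffix satisfies the protection
-- invariant for ch.
lemma scan_spec :
    ∀ (w done : List Char) (ch0 : Char) (pos0 : Nat),
      done ≠ [] →
      (∃ u v', done = u ++ ch0 :: v' ∧ u.length = pos0 ∧
        (∀ c ∈ u, ch0 < c) ∧ (∀ c ∈ v', ch0 ≤ c)) →
      (∀ i (h : i < done.length), done[i] ∈ done.drop (i + 1) ++ w) →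
      ∃ U V, done ++ w = U ++ (scanB ch0 pos0 done.length w).1 :: V ∧
        U.length = (scanB ch0 pos0 done.length w).2 ∧
        (∀ c ∈ U, (scanB ch0 pos0 done.length w).1 < c) ∧
        (∀ c ∈ U, c ∈ V) ∧
        INV (scanB ch0 pos0 done.length w).1 [] V := by
  intro w
  induction w with
  | nil =>
      intro done ch0 pos0 hne _ hb
      exfalso
      obtain ⟨p', d, rfl⟩ := (List.eq_nil_or_concat done).resolve_left hne
      have := hb p'.length (by simp)
      simp at this
  | cons c rest ih =>
      rintro done ch0 pos0 hne ⟨u, v', hdone, hulen, hu, hv'⟩ hb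
      by_cases hmem : c ∈ rest
      · -- the scan continues
        have hscan : scanB ch0 pos0 done.length (c :: rest) =
            scanB (if c < ch0 then (c, done.length) else (ch0, pos0)).1
                  (if c < ch0 then (c, done.length) else (ch0, pos0)).2
                  (done.length + 1) rest := by
          simp only [scanB]
          rw [if_pos hmem]
        have hlen' : (done ++ [c]).length = done.length + 1 := by simp
        have hdnil : done ++ [c] ≠ [] := by simp
        -- the accumulator is the first minimum of the extended prefix
        have hacc : ∃ u2 v2, done ++ [c] =
            u2 ++ (if c < ch0 then (c, done.length) else (ch0, pos0)).1 :: v2 ∧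
            u2.length = (if c < ch0 then (c, done.length) else (ch0, pos0)).2 ∧
            (∀ e ∈ u2, (if c < ch0 then (c, done.length) else (ch0, pos0)).1 < e) ∧
            (∀ e ∈ v2, (if c < ch0 then (c, done.length) else (ch0, pos0)).1 ≤ e) := by
          by_cases hlt : c < ch0
          · rw [if_pos hlt]
            refine ⟨done, [], by simp, rfl, ?_, by simp⟩
            intro e he
            rw [hdone] at he
            rcases List.mem_append.1 he with he1 | he2
            · exact lt_trans hlt (hu e he1)
            · rcases List.mem_cons.1 he2 with rfl | he3
              · exact hlt
              · exact lt_of_lt_of_le hlt (hv' e he3)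
          · rw [if_neg hlt]
            refine ⟨u, v' ++ [c], by rw [hdone]; simp, hulen, hu, ?_⟩
            intro e he
            rcases List.mem_append.1 he with he1 | he2
            · exact hv' e he1
            · have : e = c := by simpa using he2
              exact this ▸ not_lt.1 hlt
        -- every position of the extended prefix still reoccurs later
        have hb' : ∀ i (h : i < (done ++ [c]).length),
            (done ++ [c])[i] ∈ (done ++ [c]).drop (i + 1) ++ rest := by
          intro i hi
          by_cases hid : i < done.length
          · rw [List.getElem_append_left hid,
              List.drop_append_of_le_length (by omega)]
            have := hb i hid
            simpa [List.append_assoc] using this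
          · have hi2 : i < done.length + 1 := by rw [hlen'] at hi; exact hi
            have hieq : i = done.length := by omega
            subst hieq
            have hg : (done ++ [c])[done.length]'(by simp) = c := by simp
            rw [hg, List.drop_eq_nil_of_le (by simp)]
            simpa using hmem
        have := ih (done ++ [c]) _ _ hdnil hacc hb'
        rw [hlen'] at this
        rw [hscan]
        simpa [List.append_assoc] using this
      · -- the scan breaks here
        have hscan : scanB ch0 pos0 done.length (c :: rest) =
            (if c < ch0 then (c, done.length) else (ch0, pos0)) := by
          simp only [scanB]
          rw [if_neg hmem]
        have hre : ∀ e ∈ done, e ∈ c :: rest := by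
          refine reoccur done (c :: rest) ?_
          intro i hi
          exact hb i hi
        by_cases hlt : c < ch0
        · rw [hscan, if_pos hlt]
          have hgt : ∀ e ∈ done, c < e := by
            intro e he
            rw [hdone] at he
            rcases List.mem_append.1 he with he1 | he2
            · exact lt_trans hlt (hu e he1)
            · rcases List.mem_cons.1 he2 with rfl | he3
              · exact hlt
              · exact lt_of_lt_of_le hlt (hv' e he3)
          refine ⟨done, rest, rfl, rfl, hgt, ?_, ?_⟩
          · intro e he
            rcases List.mem_cons.1 (hre e he) with rfl | h2
            · exact absurd rfl (ne_of_gt (hgt e he))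
            · exact h2
          · intro hch
            exact absurd hch hmem
        · rw [hscan, if_neg hlt]
          refine ⟨u, v' ++ c :: rest, by rw [hdone]; simp, hulen, hu, ?_, ?_⟩
          · intro e he
            have : e ∈ done := by rw [hdone]; exact List.mem_append_left _ he
            exact List.mem_append_right _ (hre e this)
          · intro _
            exact Or.inr ⟨v', c, rest, rfl, fun e he => not_lt.2 (hv' e he), hlt, hmem⟩

-- one round of A's pass equals one round of B's greedy selection; induction on a
-- length bound gives the full equality of the two list-level algorithms.
lemma runA_eq_altCore : ∀ (n : Nat) (l : List Char), l.length ≤ n →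
    (runA [] l).reverse = altCore l := by
  intro n
  induction n with
  | zero =>
      intro l hl
      have : l = [] := List.eq_nil_of_length_eq_zero (Nat.le_zero.1 hl)
      subst this
      simp [runA, altCore]
  | succ n ihn =>
      intro l hl
      cases l with
      | nil => simp [runA, altCore]
      | cons c0 t =>
          by_cases hc0 : c0 ∈ t
          · have hscan : scanB c0 0 0 (c0 :: t) = scanB c0 0 1 t := by
              simp [scanB, hc0]
            obtain ⟨U, V, h1, h2, h3, h4, h5⟩ :=
              scan_spec t [c0] c0 0 (by simp)
                ⟨[], [], rfl, rfl, by simp, by simp⟩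
                (by intro i hi
                    simp only [List.length_cons, List.length_nil] at hi
                    interval_cases i
                    simpa using hc0)
            simp only [List.singleton_append, List.length_cons, List.length_nil] at h1 h2 h3 h4 h5
            set ch := (scanB c0 0 1 t).1 with hch
            set pos := (scanB c0 0 1 t).2 with hpos
            have hrun : runA [] (c0 :: t) = runA [] (V.filter (· ≠ ch)) ++ [ch] := by
              rw [h1]
              rw [runA_toMin ch V U [] (fun e he => ⟨h3 e he, h4 e he⟩) (by simp)]
              have := runA_bottom ch V [] (by simp) h5
              simpa using this
            have hdrop : (c0 :: t).drop (pos + 1) = V := by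
              rw [h1, ← h2]
              rw [show U ++ ch :: V = (U ++ [ch]) ++ V by simp]
              rw [show U.length + 1 = (U ++ [ch]).length by simp]
              exact List.drop_left
            have hVlen : V.length ≤ n := by
              have : (c0 :: t).length = U.length + V.length + 1 := by
                rw [h1]; simp; omega
              simp only [List.length_cons] at this hl
              omega
            rw [hrun, List.reverse_append]
            rw [altCore, hscan, ← hch, ← hpos, hdrop]
            simp only [List.reverse_cons, List.reverse_nil, List.nil_append,
              List.singleton_append]
            rw [ihn (V.filter (· ≠ ch)) (le_trans (List.length_filter_le _ _) hVlen)]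
          · have hscan : scanB c0 0 0 (c0 :: t) = (c0, 0) := by
              simp [scanB, hc0]
            have hrun : runA [] (c0 :: t) = runA [] (t.filter (· ≠ c0)) ++ [c0] := by
              have h0 : runA [] (c0 :: t) = runA [c0] t := by
                simp [runA, popW]
              rw [h0]
              have := runA_bottom c0 t [] (by simp) (fun hch => absurd hch hc0)
              simpa using this
            rw [hrun, List.reverse_append]
            rw [altCore, hscan]
            simp only [List.reverse_cons, List.reverse_nil, List.nil_append,
              List.singleton_append, List.drop_succ_cons, List.drop_zero]
            rw [ihn (t.filter (· ≠ c0))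
              (le_trans (List.length_filter_le _ _) (by simpa using Nat.lt_succ_iff.1 (by simpa using hl)))]

-- ===== bridge from port A's Dict/Set state to the clean model =====

lemma mem_iff_of_contains_eq {l1 l2 : List Char} {x : Char}
    (h : l1.contains x = l2.contains x) : x ∈ l1 ↔ x ∈ l2 := by
  constructor <;> intro hm
  · have h1 : l1.contains x = true := by simpa using hm
    have : l2.contains x = true := by rw [← h]; exact h1
    simpa using this
  · have h1 : l2.contains x = true := by simpa using hm
    have : l1.contains x = true := by rw [h]; exact h1
    simpa using this

lemma contains_eq_of_mem_iff {l1 l2 : List Char} {x : Char}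
    (h : x ∈ l1 ↔ x ∈ l2) : l1.contains x = l2.contains x := by
  by_cases hm : x ∈ l1
  · have h2 := h.1 hm
    simp [hm, h2]
  · have h2 : x ∉ l2 := fun hh => hm (h.2 hh)
    simp [hm, h2]

lemma pyPop_bridge (c : Char) (rest : List Char) (counter : PySem.Dict Char Int)
    (hcnt : ∀ x, counter.getD x 0 = (rest.count x : Int)) :
    ∀ (stack : List Char) (seen : PySem.Set Char), stack.Nodup →
      (∀ x, PySem.Set.contains seen x = stack.contains x) →
      (pyPop c counter stack seen).1 = popW c rest stack ∧
      (∀ x, PySem.Set.contains (pyPop c counter stack seen).2 x =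
        (popW c rest stack).contains x) := by
  intro stack
  induction stack with
  | nil =>
      intro seen _ hseen
      exact ⟨rfl, fun x => by simpa [popW] using hseen x⟩
  | cons t st ih =>
      intro seen hnd hseen
      have hcond : (c < t ∧ counter.getD t 0 > 0) ↔ (c < t ∧ t ∈ rest) := by
        rw [hcnt t]
        constructor
        · rintro ⟨h1, h2⟩
          exact ⟨h1, List.count_pos_iff.1 (by exact_mod_cast h2)⟩
        · rintro ⟨h1, h2⟩
          exact ⟨h1, by exact_mod_cast Nat.cast_pos.2 (List.count_pos_iff.2 h2)⟩
      simp only [pyPop, popW]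
      by_cases h : c < t ∧ t ∈ rest
      · rw [if_pos (hcond.2 h), if_pos h]
        have htst : t ∉ st := (List.nodup_cons.1 hnd).1
        refine ih (PySem.Set.discard seen t) (List.nodup_cons.1 hnd).2 ?_
        intro x
        have hx := mem_iff_of_contains_eq (hseen x)
        apply contains_eq_of_mem_iff
        simp only [PySem.Set.discard, List.mem_filter]
        constructor
        · rintro ⟨h1, h2⟩
          have hxt : x ≠ t := by simpa using h2
          rcases List.mem_cons.1 (hx.1 h1) with rfl | h3
          · exact absurd rfl hxt
          · exact h3
        · intro h1
          have hxt : x ≠ t := fun hh => htst (hh ▸ h1)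
          exact ⟨hx.2 (List.mem_cons_of_mem _ h1), by simpa using hxt⟩
      · rw [if_neg (fun hh => h (hcond.1 hh)), if_neg h]
        exact ⟨rfl, hseen⟩

lemma pyLoop_bridge :
    ∀ (l : List Char) (counter : PySem.Dict Char Int) (stack : List Char)
      (seen : PySem.Set Char), stack.Nodup →
      (∀ x, PySem.Set.contains seen x = stack.contains x) →
      (∀ x, counter.getD x 0 = (l.count x : Int)) →
      pyLoop counter stack seen l = runA stack l := by
  intro l
  induction l with
  | nil => intro counter stack seen _ _ _; rfl
  | cons c rest ih =>
      intro counter stack seen hnd hseen hcnt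
      have hcnt' : ∀ x, (counter.modify c 0 (· - 1)).getD x 0 = (rest.count x : Int) := by
        intro x
        by_cases hx : x = c
        · subst hx
          rw [PySem.Dict.getD_modify_self, hcnt x, List.count_cons_self]
          push_cast; ring
        · rw [PySem.Dict.getD_modify_of_ne _ _ _ hx, hcnt x]
          simp [Ne.symm hx]
      simp only [pyLoop, runA]
      by_cases hc : c ∈ stack
      · have hsc : PySem.Set.contains seen c = true := by
          rw [hseen c]; simpa using hc
        rw [if_pos hsc, if_pos hc]
        exact ih _ stack seen hnd hseen hcnt'
      · have hsc : ¬ PySem.Set.contains seen c = true := by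
          rw [hseen c]; simpa using hc
        rw [if_neg hsc, if_neg hc]
        obtain ⟨hfst, hsnd⟩ :=
          pyPop_bridge c rest (counter.modify c 0 (· - 1)) hcnt' stack seen hnd hseen
        rw [hfst]
        have hcP : c ∉ popW c rest stack := fun h => hc (mem_of_mem_popW h)
        refine ih _ (c :: popW c rest stack) _ ?_ ?_ hcnt'
        · exact List.nodup_cons.2 ⟨hcP, ((popW_suffix c rest stack).sublist).nodup hnd⟩
        · intro x
          have hmemP := fun y => mem_iff_of_contains_eq (hsnd y)
          simp only [PySem.Set.add]
          have hcc : ¬ PySem.Set.contains (pyPop c (counter.modify c 0 (· - 1)) stack seen).2 c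
              = true := by
            rw [hsnd c]
            simpa using hcP
          rw [if_neg hcc]
          apply contains_eq_of_mem_iff
          constructor
          · intro h1
            rcases List.mem_append.1 h1 with h2 | h2
            · exact List.mem_cons_of_mem _ ((hmemP x).1 h2)
            · have : x = c := by simpa using h2
              exact this ▸ List.mem_cons_self
          · intro h1
            rcases List.mem_cons.1 h1 with rfl | h2
            · exact List.mem_append_right _ (List.mem_cons_self)
            · exact List.mem_append_left _ ((hmemP x).2 h2)

-- ===== VERDICT (by name: the statement is the Claim_ definition above) =====
theorem remove_duplicate_letters_stack_spec : Claim_equal_remove_duplicate_letters_stack := by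
  intro s _
  unfold Spec_remove_duplicate_letters_stack
  unfold remove_duplicate_letters_stack remove_duplicate_letters_stack_alt
  rw [pyLoop_bridge s.toList (PySem.Dict.counter s.toList) [] PySem.Set.empty
    (by simp) (fun x => rfl) (fun x => PySem.Dict.getD_counter s.toList x)]
  rw [runA_eq_altCore s.toList.length s.toList (le_refl _)]
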